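-- pv_equiv track=rewrite | github.com/DragunWF/Competitive-Programming | CodeWars/python/6_kyu/upside_down_numbers.py | is_same_rotated
-- ===== SOURCE A (Python) =====
-- def is_same_rotated(n: int) -> bool:
--     reversions = {"6": "9", "9": "6"}
--     same_reversions = ["0", "1", "8"]
--     str_num = str(n)
--     reversed_str_num = str_num[::-1]
--     output = ""
--     for digit in reversed_str_num:
--         if digit in reversions:
--             output += reversions[digit]
--         elif digit in same_reversions:
--             output += digit
--         else:
--             return False
--     return str_num == output
-- ===== SOURCE B (Python) =====
-- def is_same_rotated(n: int) -> bool: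
--     rot = {"0": "0", "1": "1", "8": "8", "6": "9", "9": "6"}
--     digits = list(str(n))
--     while len(digits) > 1:
--         first = digits.pop(0)
--         last = digits.pop()
--         if rot.get(first) != last:
--             return False
--     return not digits or rot.get(digits[0]) == digits[0]
-- ===== Notes on version B (the rewrite author's own statement) =====
-- stated objective: alternative
-- what changed: B replaces A's build-the-rotated-string-then-compare with a two-ended pairwise check that pops the first and last digit and compares the last with the first digit's rotation, with a self-rotation check for an odd middle digit.
import Mathlib
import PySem

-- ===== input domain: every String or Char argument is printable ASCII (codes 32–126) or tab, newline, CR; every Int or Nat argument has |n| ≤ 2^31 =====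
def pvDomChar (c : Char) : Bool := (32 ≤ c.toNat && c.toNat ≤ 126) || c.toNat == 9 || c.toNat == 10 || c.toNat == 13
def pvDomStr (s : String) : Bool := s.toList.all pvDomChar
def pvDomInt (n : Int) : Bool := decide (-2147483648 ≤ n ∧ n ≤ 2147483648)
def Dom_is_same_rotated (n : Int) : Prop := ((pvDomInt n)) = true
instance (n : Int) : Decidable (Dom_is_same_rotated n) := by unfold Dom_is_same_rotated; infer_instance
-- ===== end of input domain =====

-- B replaces A's build-the-rotated-string-and-compare with a two-ended pairwise check
-- (pop first/last, compare last with the first digit's rotation); objective: alternative.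

-- ===== PORT A =====
-- A's per-digit rotation: the dict {"6":"9","9":"6"} lookup, then the list ["0","1","8"].
def aRot (c : Char) : Option Char :=
  if c = '6' then some '9'
  else if c = '9' then some '6'
  else if c = '0' ∨ c = '1' ∨ c = '8' then some c
  else none

-- A's for-loop over the reversed digits, accumulating `output`; none = the early `return False`.
def aLoop (acc : List Char) : List Char → Option (List Char)
  | [] => some acc
  | c :: t =>
    match aRot c with
    | some r => aLoop (acc ++ [r]) t
    | none => none

def is_same_rotated (n : Int) : Bool :=
  let strNum := PySem.Int.toChars n
  let reversedStrNum := strNum.reverse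
  match aLoop [] reversedStrNum with
  | none => false
  | some output => strNum == output

-- ===== PORT B =====
-- B's rotation dict {"0":"0","1":"1","8":"8","6":"9","9":"6"}; .get, none = missing key.
def bRot (c : Char) : Option Char :=
  if c = '0' then some '0'
  else if c = '1' then some '1'
  else if c = '8' then some '8'
  else if c = '6' then some '9'
  else if c = '9' then some '6'
  else none

-- B's while-loop: pop the first and last digits, compare, until ≤ 1 digit remains.
def bLoop (l : List Char) : Bool :=
  match l with
  | [] => true
  | [c] => bRot c == some c
  | c :: t => (bRot c == some t.getLast!) && bLoop t.dropLast
termination_by l.length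
decreasing_by simp [List.length_dropLast]

def is_same_rotated_alt (n : Int) : Bool :=
  bLoop (PySem.Int.toChars n)

-- ===== PRECONDITION & SPEC =====
def Spec_is_same_rotated (n : Int) (out : Bool) : Prop := out = is_same_rotated_alt n
instance (n : Int) (out : Bool) : Decidable (Spec_is_same_rotated n out) := by unfold Spec_is_same_rotated; infer_instance

-- ===== CLAIM (what is proved, stated in full; the proofs are below) =====
def Claim_equal_is_same_rotated : Prop := ∀ (n : Int), Dom_is_same_rotated n → Spec_is_same_rotated n (is_same_rotated n)

-- ===== LEMMAS AND PROOFS =====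

theorem aRot_eq_bRot (c : Char) : aRot c = bRot c := by
  unfold aRot bRot
  split_ifs <;> simp_all

-- bRot is symmetric as a relation
theorem bRot_symm {a b : Char} (h : bRot a = some b) : bRot b = some a := by
  unfold bRot at h ⊢
  split_ifs at h
  all_goals (try (injection h with h'))
  all_goals subst_vars
  all_goals decide

theorem aLoop_shift (l : List Char) : ∀ acc, aLoop acc l = (aLoop [] l).map (acc ++ ·) := by
  induction l with
  | nil => intro acc; simp [aLoop]
  | cons c t ih =>
    intro acc
    cases h : aRot c with
    | none => simp [aLoop, h]
    | some r =>
      simp only [aLoop, h, List.nil_append]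
      rw [ih (acc ++ [r]), ih [r], Option.map_map]
      congr 1
      funext o
      simp

theorem aLoop_some_iff (l : List Char) :
    ∀ out, aLoop [] l = some out ↔ List.Forall₂ (fun a b => bRot a = some b) l out := by
  induction l with
  | nil =>
    intro out
    simp [aLoop, List.forall₂_nil_left_iff, eq_comm]
  | cons c t ih =>
    intro out
    cases h : aRot c with
    | none =>
      simp only [aLoop, h]
      constructor
      · intro hc; simp at hc
      · intro hf
        cases hf with
        | cons hcb _ => rw [← aRot_eq_bRot, h] at hcb; simp at hcb
    | some r =>
      simp only [aLoop, h, List.nil_append]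
      rw [aLoop_shift]
      constructor
      · intro hm
        rcases Option.map_eq_some_iff.mp hm with ⟨o, ho, rfl⟩
        exact List.Forall₂.cons (by rw [← aRot_eq_bRot, h]) ((ih o).mp ho)
      · intro hf
        cases hf with
        | cons hcb htl =>
          rename_i b o
          rw [← aRot_eq_bRot, h] at hcb
          injection hcb with hr
          subst hr
          rw [(ih o).mpr htl]
          rfl

-- A = true iff each digit of the reversed string rotates to the matching digit of the string
theorem portA_iff (l : List Char) :
    (match aLoop [] l.reverse with
     | none => false
     | some output => l == output) = true ↔
    List.Forall₂ (fun a b => bRot a = some b) l.reverse l := by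
  cases h : aLoop [] l.reverse with
  | none =>
    constructor
    · intro hc; exact Bool.noConfusion hc
    · intro hf
      rw [(aLoop_some_iff l.reverse l).mpr hf] at h
      simp at h
  | some output =>
    simp only [beq_iff_eq]
    constructor
    · rintro rfl; exact (aLoop_some_iff _ _).mp h
    · intro hf
      have := (aLoop_some_iff l.reverse l).mpr hf
      rw [this] at h; exact Option.some.inj h

theorem bLoop_snoc (a b : Char) (m : List Char) :
    bLoop (a :: (m ++ [b])) = ((bRot a == some b) && bLoop m) := by
  cases m with
  | nil =>
    rw [bLoop.eq_def]
    simp [bLoop]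
  | cons x t =>
    rw [show (a :: ((x :: t) ++ [b])) = a :: x :: (t ++ [b]) from rfl, bLoop.eq_def]
    have h2 : (x :: (t ++ [b])).dropLast = x :: t := by
      rw [show x :: (t ++ [b]) = (x :: t) ++ [b] from rfl, List.dropLast_concat]
    simp [List.getLast!, h2]

theorem forall₂_snoc_iff {R : Char → Char → Prop} {a b : Char} {x y : List Char} :
    List.Forall₂ R (x ++ [a]) (y ++ [b]) ↔ List.Forall₂ R x y ∧ R a b := by
  rw [← List.forall₂_reverse_iff]
  simp only [List.reverse_append, List.reverse_cons, List.reverse_nil, List.nil_append,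
    List.singleton_append, List.forall₂_cons, List.forall₂_reverse_iff]
  tauto

theorem portB_iff (l : List Char) :
    bLoop l = true ↔ List.Forall₂ (fun a b => bRot a = some b) l.reverse l := by
  induction l using List.bidirectionalRec with
  | nil =>
    rw [bLoop.eq_def]
    simp
  | singleton a =>
    rw [bLoop.eq_def]
    simp
  | cons_append a m b ih =>
    rw [bLoop_snoc]
    rw [show (a :: (m ++ [b])).reverse = b :: (m.reverse ++ [a]) by simp]
    rw [List.forall₂_cons]
    constructor
    · intro hand
      rcases Bool.and_eq_true_iff.mp hand with ⟨heq, hb⟩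
      have hab : bRot a = some b := beq_iff_eq.mp heq
      exact ⟨bRot_symm hab, forall₂_snoc_iff.mpr ⟨ih.mp hb, hab⟩⟩
    · rintro ⟨hba, hrest⟩
      rcases forall₂_snoc_iff.mp hrest with ⟨hmid, hab⟩
      exact Bool.and_eq_true_iff.mpr ⟨beq_iff_eq.mpr hab, ih.mpr hmid⟩

-- ===== VERDICT (by name: the statement is the Claim_ definition above) =====
theorem is_same_rotated_spec : Claim_equal_is_same_rotated := by
  intro n _
  unfold Spec_is_same_rotated is_same_rotated is_same_rotated_alt
  rw [Bool.eq_iff_iff]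
  exact (portA_iff (PySem.Int.toChars n)).trans (portB_iff (PySem.Int.toChars n)).symm
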